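-- pv_equiv track=rewrite | github.com/famavott/codewars-katas | src/consonant_value.py | solve
-- ===== SOURCE A (Python) =====
-- def solve(s):
--     """Return max substring value.
--
--     Strips string into substring and calculates value based on mapping
--     using ord() - 96 value for letters a-z.
--     """
--     vowels = 'aeiou'
--     stripped = ''
--     for l in s:
--         if l in vowels:
--             stripped += ','
--         else:
--             stripped += l
--     stripped_list = stripped.split(',')
--     sub_values = []
--     for item in stripped_list:
--         if len(item) >= 1:
--             vals = sum([ord(x) - 96 for x in item])
--             sub_values.append(vals)
--     return max(sub_values)
-- ===== SOURCE B (Python) =====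
-- def solve(s):
--     """Return max substring value via one fused scan.
--
--     A group ends at any of 'aeiou,' (vowels, plus ',' which in A's
--     build-then-split pipeline delimits groups the same way); every other
--     character contributes ord(ch) - 96 to the running group sum.
--     Raises ValueError (max of empty list) exactly when A does.
--     """
--     groups = []
--     cur = 0
--     cnt = 0
--     for ch in s:
--         if ch in 'aeiou,':
--             if cnt:
--                 groups.append(cur)
--             cur = 0
--             cnt = 0
--         else:
--             cur += ord(ch) - 96
--             cnt += 1
--     if cnt:
--         groups.append(cur)
--     return max(groups)
-- ===== Notes on version B (the rewrite author's own statement) =====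
-- stated objective: simpler
-- what changed: Replaces A's three-stage pipeline (build a comma-delimited string char by char, split it, then sum each non-empty piece) with a single fused scan that keeps a running group sum and flushes it at each delimiter (vowel or comma, exactly the characters that end a group in A's split).
import Mathlib
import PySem

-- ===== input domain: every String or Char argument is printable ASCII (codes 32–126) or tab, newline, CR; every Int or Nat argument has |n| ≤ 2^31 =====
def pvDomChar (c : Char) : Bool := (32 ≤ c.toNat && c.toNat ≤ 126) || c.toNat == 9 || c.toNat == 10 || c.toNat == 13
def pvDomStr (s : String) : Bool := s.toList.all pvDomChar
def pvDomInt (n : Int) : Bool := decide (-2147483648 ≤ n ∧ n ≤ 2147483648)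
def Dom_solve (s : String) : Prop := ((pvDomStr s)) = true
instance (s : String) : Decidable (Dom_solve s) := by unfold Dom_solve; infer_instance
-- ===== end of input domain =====

-- B replaces A's build-string / split-on-comma / sum-each-piece pipeline by one fused scan
-- keeping a running group sum; objective: simpler (one pass, no intermediate string/list of pieces).

-- ===== PORT A =====
def pvVowels : List Char := ['a', 'e', 'i', 'o', 'u']

def solve (s : String) : Int :=
  -- stripped: vowels replaced by ',', every other char kept
  let stripped : List Char :=
    s.toList.foldl (fun acc l => if l ∈ pvVowels then acc ++ [','] else acc ++ [l]) []
  -- stripped.split(',')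
  let strippedList : List (List Char) := PySem.Chars.splitOn stripped [',']
  -- sub_values: sum(ord(x) - 96 for x in item) for each non-empty item
  let subValues : List Int :=
    strippedList.foldl
      (fun sv item =>
        if 1 ≤ item.length then sv ++ [(item.map (fun x => (x.toNat : Int) - 96)).sum] else sv)
      []
  -- max(sub_values); Python raises ValueError when sub_values is empty — excluded by Pre_solve
  (PySem.List.max? subValues id).getD 0

-- ===== PORT B =====
def pvSeps : List Char := ['a', 'e', 'i', 'o', 'u', ',']

def solve_alt (s : String) : Int :=
  let st :=
    s.toList.foldl
      (fun (st : List Int × Int × Int) ch =>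
        let (groups, cur, cnt) := st
        if ch ∈ pvSeps then
          (if cnt ≠ 0 then groups ++ [cur] else groups, 0, 0)
        else
          (groups, cur + ((ch.toNat : Int) - 96), cnt + 1))
      ([], 0, 0)
  let groups := if st.2.2 ≠ 0 then st.1 ++ [st.2.1] else st.1
  -- max(groups); Python raises ValueError when groups is empty — excluded by Pre_solve
  (PySem.List.max? groups id).getD 0

-- ===== PRECONDITION & SPEC =====
-- Pre_: A calls max on an empty list (ValueError) exactly when every char of s is a
-- vowel or a comma (commas delimit the split pieces); B raises there too.
def Pre_solve (s : String) : Prop := (s.toList.any (fun c => !(pvSeps.contains c))) = true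
instance (s : String) : Decidable (Pre_solve s) := by unfold Pre_solve; infer_instance

def pvWitness_solve : String := "b"

def Spec_solve (s : String) (out : Int) : Prop := out = solve_alt s
instance (s : String) (out : Int) : Decidable (Spec_solve s out) := by unfold Spec_solve; infer_instance

-- ===== CLAIM (what is proved, stated in full; the proofs are below) =====
def Claim_equal_solve : Prop := ∀ (s : String), Dom_solve s → Pre_solve s → Spec_solve s (solve s)

-- ===== LEMMAS AND PROOFS =====

-- the char A writes into `stripped` for an input char
def pvF (c : Char) : Char := if c ∈ pvVowels then ',' else c

-- value of one char
def pvVal (c : Char) : Int := (c.toNat : Int) - 96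

-- the list of non-empty-group sums, fused-scan style (specification both ports meet)
def pvG (cur cnt : Int) : List Char → List Int
  | [] => if cnt ≠ 0 then [cur] else []
  | c :: cs =>
      if c ∈ pvSeps then
        (if cnt ≠ 0 then cur :: pvG 0 0 cs else pvG 0 0 cs)
      else
        pvG (cur + pvVal c) (cnt + 1) cs

-- sums of the non-empty pieces of a split list
def pvValsOf : List (List Char) → List Int
  | [] => []
  | p :: rest => (if 1 ≤ p.length then [(p.map pvVal).sum] else []) ++ pvValsOf rest

theorem pvSplitOn_go_comma (fuel : Nat) :
    ∀ (l cur : List Char) (acc : List (List Char)), l.length < fuel →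
      PySem.Chars.splitOn.go [','] fuel l cur acc =
        acc.reverse ++ (List.splitOnP (· == ',') l).modifyHead (cur.reverse ++ ·) := by
  induction fuel with
  | zero => intro l cur acc h; omega
  | succ n ih =>
    intro l cur acc h
    cases l with
    | nil =>
      simp [PySem.Chars.splitOn.go, List.splitOnP_nil]
    | cons c rest =>
      by_cases hc : c = ','
      · subst hc
        rw [PySem.Chars.splitOn.go]
        simp only [List.isPrefixOf, Bool.and_true, beq_self_eq_true, if_pos,
          List.length_cons, List.length_nil, List.drop_succ_cons, List.drop_zero]
        rw [ih rest [] (cur.reverse :: acc) (by simpa using Nat.lt_of_succ_lt_succ h)]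
        simp [List.splitOnP_cons, List.modifyHead]
        cases List.splitOnP (· == ',') rest <;> simp
      · rw [PySem.Chars.splitOn.go]
        have hpre : List.isPrefixOf [','] (c :: rest) = false := by
          simp [List.isPrefixOf]
          exact fun h' => absurd h'.symm hc
        rw [if_neg (by simp [hpre])]
        rw [ih rest (c :: cur) acc (by simpa using Nat.lt_of_succ_lt_succ h)]
        rw [List.splitOnP_cons]
        have : ((c : Char) == ',') = false := by simp [hc]
        rw [this]
        simp only [Bool.false_eq_true, List.reverse_cons]
        cases List.splitOnP (· == ',') rest <;> simp [List.modifyHead]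

theorem pvSplitOn_eq (l : List Char) :
    PySem.Chars.splitOn l [','] = List.splitOnP (· == ',') l := by
  unfold PySem.Chars.splitOn
  rw [pvSplitOn_go_comma (l.length + 1) l [] [] (by omega)]
  cases List.splitOnP (· == ',') l <;> simp [List.modifyHead]

theorem pvStripped_eq (l : List Char) (acc : List Char) :
    l.foldl (fun a c => if c ∈ pvVowels then a ++ [','] else a ++ [c]) acc
      = acc ++ l.map pvF := by
  induction l generalizing acc with
  | nil => simp
  | cons c cs ih =>
    simp only [List.foldl_cons, List.map_cons, pvF]
    by_cases hv : c ∈ pvVowels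
    · rw [if_pos hv, if_pos hv, ih]; simp
    · rw [if_neg hv, if_neg hv, ih]; simp

theorem pvSubValues_eq (ps : List (List Char)) (acc : List Int) :
    ps.foldl
      (fun sv item =>
        if 1 ≤ item.length then sv ++ [(item.map (fun x => (x.toNat : Int) - 96)).sum] else sv)
      acc = acc ++ pvValsOf ps := by
  induction ps generalizing acc with
  | nil => simp [pvValsOf]
  | cons p rest ih =>
    simp only [List.foldl_cons, pvValsOf]
    by_cases hp : 1 ≤ p.length
    · rw [if_pos hp, ih]; unfold pvVal; simp [hp]
    · rw [if_neg hp, ih]; simp [hp]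

theorem pvValsOf_eq_carry (p : List Char) (rest : List (List Char)) :
    pvValsOf (p :: rest)
      = (if (0:Int) ≠ 0 ∨ 1 ≤ p.length then [0 + (p.map pvVal).sum] else []) ++ pvValsOf rest := by
  simp [pvValsOf]

theorem pvMain (l : List Char) : ∀ (cur cnt : Int), 0 ≤ cnt →
    (match List.splitOnP (· == ',') (l.map pvF) with
      | [] => if cnt ≠ 0 then [cur] else []
      | p :: rest => (if cnt ≠ 0 ∨ 1 ≤ p.length then [cur + (p.map pvVal).sum] else []) ++ pvValsOf rest)
      = pvG cur cnt l := by
  induction l with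
  | nil =>
    intro cur cnt hcnt
    simp [List.splitOnP_nil, pvG, pvValsOf]
  | cons c cs ih =>
    intro cur cnt hcnt
    by_cases hs : c ∈ pvSeps
    · have hfc : pvF c = ',' := by
        by_cases hv : c ∈ pvVowels
        · simp [pvF, hv]
        · have : c = ',' := by
            simp [pvSeps] at hs
            simp [pvVowels] at hv
            rcases hs with h|h|h|h|h|h <;> simp_all
          simp [pvF, this]
      rw [List.map_cons, hfc, List.splitOnP_cons]
      simp only [beq_self_eq_true, if_pos]
      rw [pvG]
      rw [if_pos hs]
      have h0 := ih 0 0 le_rfl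
      rcases hsp : List.splitOnP (· == ',') (cs.map pvF) with _ | ⟨p, rest⟩
      · exact absurd hsp (List.splitOnP_ne_nil _ _)
      · rw [hsp] at h0
        simp only [ne_eq, not_true_eq_false, false_or] at h0 ⊢
        rw [zero_add] at h0
        rw [← h0]
        by_cases hcz : cnt = 0 <;> simp [hcz, pvValsOf]
    · have hfc : pvF c = c := by
        have hv : c ∉ pvVowels := fun hv => hs (by simp [pvSeps, pvVowels] at hv ⊢; tauto)
        simp [pvF, hv]
      have hcc : ((pvF c) == ',') = false := by
        rw [hfc]; simp; intro h; exact hs (by simp [pvSeps, h])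
      rw [List.map_cons, List.splitOnP_cons, hcc]
      simp only [Bool.false_eq_true, reduceIte]
      rw [pvG, if_neg hs]
      have h1 := ih (cur + pvVal c) (cnt + 1) (by omega)
      rcases hsp : List.splitOnP (· == ',') (cs.map pvF) with _ | ⟨p, rest⟩
      · exact absurd hsp (List.splitOnP_ne_nil _ _)
      · rw [hsp] at h1
        have hc1 : cnt + 1 ≠ 0 := by omega
        simp only [hc1, ne_eq, not_false_eq_true, true_or, reduceIte, List.modifyHead] at h1 ⊢
        rw [← h1]
        have : cnt ≠ 0 ∨ 1 ≤ (c :: p).length := Or.inr (by simp)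
        simp only [List.map_cons, List.sum_cons]
        simp [add_assoc]
        rw [hfc]

-- named copy of B's loop body (definitionally equal to the lambda in solve_alt)
def pvStep (st : List Int × Int × Int) (ch : Char) : List Int × Int × Int :=
  if ch ∈ pvSeps then
    (if st.2.2 ≠ 0 then st.1 ++ [st.2.1] else st.1, 0, 0)
  else
    (st.1, st.2.1 + ((ch.toNat : Int) - 96), st.2.2 + 1)

theorem pvFoldB (l : List Char) :
    ∀ (groups : List Int) (cur cnt : Int),
      (let st := l.foldl pvStep (groups, cur, cnt)
       if st.2.2 ≠ 0 then st.1 ++ [st.2.1] else st.1)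
      = groups ++ pvG cur cnt l := by
  induction l with
  | nil => intro groups cur cnt; by_cases h : cnt = 0 <;> simp [pvG, h]
  | cons c cs ih =>
    intro groups cur cnt
    simp only [List.foldl_cons]
    by_cases hs : c ∈ pvSeps
    · rw [pvG, if_pos hs]
      have hstep : pvStep (groups, cur, cnt) c
          = (if cnt ≠ 0 then groups ++ [cur] else groups, 0, 0) := by
        simp [pvStep, hs]
      rw [hstep]
      by_cases hz : cnt = 0
      · have h1 : (if cnt ≠ 0 then groups ++ [cur] else groups) = groups := by simp [hz]
        have h2 : (if cnt ≠ 0 then cur :: pvG 0 0 cs else pvG 0 0 cs) = pvG 0 0 cs := by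
          simp [hz]
        rw [h1, h2]
        exact ih groups 0 0
      · have h1 : (if cnt ≠ 0 then groups ++ [cur] else groups) = groups ++ [cur] := by
          simp [hz]
        have h2 : (if cnt ≠ 0 then cur :: pvG 0 0 cs else pvG 0 0 cs) = cur :: pvG 0 0 cs := by
          simp [hz]
        rw [h1, h2, ih (groups ++ [cur]) 0 0]
        simp
    · rw [pvG, if_neg hs]
      have hstep : pvStep (groups, cur, cnt) c
          = (groups, cur + ((c.toNat : Int) - 96), cnt + 1) := by
        simp [pvStep, hs]
      rw [hstep]
      have := ih groups (cur + ((c.toNat : Int) - 96)) (cnt + 1)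
      simpa [pvVal] using this

-- ===== VERDICT (by name: the statement is the Claim_ definition above) =====
theorem solve_spec : Claim_equal_solve := by
  intro s _ _
  unfold Spec_solve
  have hA : solve s
      = (PySem.List.max? (pvValsOf (List.splitOnP (· == ',') (s.toList.map pvF))) id).getD 0 := by
    simp only [solve]
    rw [pvStripped_eq s.toList [], List.nil_append, pvSplitOn_eq, pvSubValues_eq,
      List.nil_append]
  have hB : solve_alt s
      = (PySem.List.max?
          (let st := s.toList.foldl pvStep ([], 0, 0)
           if st.2.2 ≠ 0 then st.1 ++ [st.2.1] else st.1) id).getD 0 := rfl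
  rw [hA, hB, pvFoldB s.toList [] 0 0, List.nil_append]
  have hM := pvMain s.toList 0 0 le_rfl
  rcases hsp : List.splitOnP (· == ',') (s.toList.map pvF) with _ | ⟨p, rest⟩
  · exact absurd hsp (List.splitOnP_ne_nil _ _)
  · rw [hsp] at hM
    have hM' : (if (0:Int) ≠ 0 ∨ 1 ≤ p.length then [0 + (p.map pvVal).sum] else [])
        ++ pvValsOf rest = pvG 0 0 s.toList := hM
    rw [pvValsOf_eq_carry, hM']
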